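-- pv_equiv track=rewrite | github.com/craigtrim/fast-sentence-segment | fast_sentence_segment/dmo/spacy_doc_segmenter.py | _merge_orphaned_quotes
-- ===== SOURCE A (Python) =====
-- def _merge_orphaned_quotes(sentences: list) -> list:
--     """Merge orphaned opening quotes with the following sentence.
--
--     spaCy sometimes splits on opening quotes, producing sentences like:
--         ["'", "Oh, the funeral..."]
--     This merges them into:
--         ["'Oh, the funeral..."]
--
--     Also handles trailing orphaned quotes that should belong to next sentence:
--         ["He said. '", "Hello!'"]
--     Becomes:
--         ["He said.", "'Hello!'"]
--     """
--     if not sentences: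
--         return sentences
--
--     result = []
--     i = 0
--     while i < len(sentences):
--         sent = sentences[i]
--         # Check if this sentence is just an opening quote
--         if sent.strip() in ("'", '"', "'.", '".'):
--             # Merge with the next sentence if available
--             if i + 1 < len(sentences):
--                 quote_char = sent.strip().rstrip('.')
--                 result.append(quote_char + sentences[i + 1])
--                 i += 2
--                 continue
--         result.append(sent)
--         i += 1
--
--     # Second pass: handle trailing orphaned quotes
--     # Pattern: sentence ends with `. '` or `. "` - move quote to next sentence
--     fixed = []
--     for i, sent in enumerate(result):
--         # Check for trailing orphaned quote (`. '` or `? '` or `! '`)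
--         if len(sent) >= 3 and sent[-2:] in (" '", ' "') and sent[-3] in '.?!':
--             # Strip the trailing quote
--             trailing_quote = sent[-1]
--             sent = sent[:-2]
--             # Prepend to next sentence if available
--             if i + 1 < len(result) and not result[i + 1].startswith(('"', "'")):
--                 result[i + 1] = trailing_quote + result[i + 1]
--         fixed.append(sent)
--
--     return fixed
-- ===== SOURCE B (Python) =====
-- def _merge_orphaned_quotes(sentences: list) -> list:
--     """Merge orphaned quote marks with adjacent sentences.
--
--     Same observable behaviour as the original, but as ONE fused left-to-right
--     pass: each step materialises the next merged sentence (absorbing a lone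
--     opening-quote token into its successor on the fly) and then flushes the
--     previously held sentence, handing its trailing orphaned quote forward to
--     the freshly built one when appropriate.  A one-sentence buffer replaces
--     the original's two staged passes and its in-place writes to result[i+1].
--     """
--     out = []
--     prev = None  # held-back merged sentence, any handed-forward quote already attached
--     i = 0
--     n = len(sentences)
--     while i < n:
--         # build the next merged sentence
--         sent = sentences[i]
--         stripped = sent.strip()
--         if stripped in ("'", '"', "'.", '".') and i + 1 < n:
--             cur = stripped.rstrip('.') + sentences[i + 1]
--             i += 2
--         else:
--             cur = sent
--             i += 1
--         # flush the held sentence, possibly handing its trailing quote to cur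
--         if prev is not None:
--             if len(prev) >= 3 and prev[-2:] in (" '", ' "') and prev[-3] in '.?!':
--                 if not cur.startswith(('"', "'")):
--                     cur = prev[-1] + cur
--                 prev = prev[:-2]
--             out.append(prev)
--         prev = cur
--     if prev is not None:
--         if len(prev) >= 3 and prev[-2:] in (" '", ' "') and prev[-3] in '.?!':
--             prev = prev[:-2]
--         out.append(prev)
--     return out
-- ===== Notes on version B (the rewrite author's own statement) =====
-- stated objective: alternative
-- what changed: A's two staged passes (a while/i+=2 merge loop over the whole list, then an enumerate loop over the intermediate list that mutates result[i+1] in place) are fused into one single left-to-right pass holding a one-sentence buffer: each step builds the next merged sentence on the fly and flushes the buffered previous sentence, handing its trailing orphaned quote forward; no intermediate list is built and nothing is mutated.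
import Mathlib
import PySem

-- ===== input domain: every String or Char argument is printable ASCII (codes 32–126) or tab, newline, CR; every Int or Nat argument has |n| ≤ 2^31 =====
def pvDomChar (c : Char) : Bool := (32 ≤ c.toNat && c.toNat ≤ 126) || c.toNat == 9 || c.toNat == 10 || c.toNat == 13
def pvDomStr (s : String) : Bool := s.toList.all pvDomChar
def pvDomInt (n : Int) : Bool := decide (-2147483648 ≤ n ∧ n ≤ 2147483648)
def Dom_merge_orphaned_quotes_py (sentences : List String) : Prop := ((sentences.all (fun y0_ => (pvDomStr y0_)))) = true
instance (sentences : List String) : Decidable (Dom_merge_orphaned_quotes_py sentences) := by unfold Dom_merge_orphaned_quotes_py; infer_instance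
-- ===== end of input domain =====

-- B fuses A's two staged passes (merge loop, then an enumerate loop mutating result[i+1])
-- into one left-to-right pass holding a one-sentence buffer; same O(n) cost, objective: alternative.

-- Shared literal tests/transforms both Pythons contain verbatim (on code-point lists):
-- sent.strip() in ("'", '"', "'.", '".')
def pvIsOrphan (s : List Char) : Bool :=
  [['\''], ['"'], ['\'', '.'], ['"', '.']].contains (PySem.Chars.strip s)
-- s.rstrip('.')  (strip trailing '.' chars; exact hand port, PySem has no rstrip-with-chars)
def pvRstripDot (s : List Char) : List Char := (s.reverse.dropWhile (· == '.')).reverse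
-- len(sent) >= 3 and sent[-2:] in (" '", ' "') and sent[-3] in '.?!'
-- (sent[-3] is a 1-char string, so the 'in' test is exact char membership)
def pvTrail (s : List Char) : Bool :=
  decide (3 ≤ s.length) &&
  (PySem.List.slice s (some (-2)) none == [' ', '\''] ||
   PySem.List.slice s (some (-2)) none == [' ', '"']) &&
  ['.', '?', '!'].contains ((PySem.List.pyGet? s (-3)).getD ' ')
-- s.startswith(('"', "'"))
def pvStartsQ (s : List Char) : Bool :=
  PySem.Chars.startswith s ['"'] || PySem.Chars.startswith s ['\'']

-- ===== PORT A =====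
-- first pass: 'i = 0; while i < len(sentences): ...' with 'i += 2; continue' on a merge
def pvA1 (xs : List (List Char)) (i : Nat) (acc : List (List Char)) : List (List Char) :=
  if h : i < xs.length then
    let sent := xs.getD i []
    if pvIsOrphan sent then
      if i + 1 < xs.length then
        pvA1 xs (i + 2) (acc ++ [pvRstripDot (PySem.Chars.strip sent) ++ xs.getD (i + 1) []])
      else pvA1 xs (i + 1) (acc ++ [sent])
    else pvA1 xs (i + 1) (acc ++ [sent])
  else acc
termination_by xs.length - i

-- second pass: 'for i, sent in enumerate(result)' that writes back into result[i + 1];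
-- modelled as recursion on the index over the current (possibly updated) list
def pvA2 (res : List (List Char)) (i : Nat) (fixed : List (List Char)) : List (List Char) :=
  if h : i < res.length then
    let sent := res.getD i []
    if pvTrail sent then
      let t := (PySem.List.pyGet? sent (-1)).getD ' '
      let sent' := PySem.List.slice sent none (some (-2))
      let res' := if i + 1 < res.length && !pvStartsQ (res.getD (i + 1) []) then
          res.set (i + 1) ([t] ++ res.getD (i + 1) []) else res
      pvA2 res' (i + 1) (fixed ++ [sent'])
    else pvA2 res (i + 1) (fixed ++ [sent])
  else fixed
termination_by res.length - i
decreasing_by all_goals (try split) <;> (try simp only [List.length_set]) <;> omega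

def merge_orphaned_quotes_py (sentences : List String) : List String :=
  if sentences = [] then sentences
  else (pvA2 (pvA1 (sentences.map String.toList) 0 []) 0 []).map String.ofList

-- ===== PORT B =====
-- flush the held sentence `prev` against the freshly built sentence `cur`:
-- returns (sentences to emit now, cur with any handed-forward quote attached)
def pvHand (prev : Option (List Char)) (cur : List Char) :
    List (List Char) × List Char :=
  match prev with
  | none => ([], cur)
  | some p =>
    if pvTrail p then
      ([PySem.List.slice p none (some (-2))],
       if pvStartsQ cur then cur else ((PySem.List.pyGet? p (-1)).getD ' ') :: cur)
    else ([p], cur)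

-- the single fused pass: build the next merged sentence, flush the buffer, recurse
def pvGo (prev : Option (List Char)) : List (List Char) → List (List Char)
  | [] =>
    (match prev with
     | none => []
     | some p => if pvTrail p then [PySem.List.slice p none (some (-2))] else [p])
  | s :: rest =>
    if pvIsOrphan s then
      match rest with
      | nxt :: rest2 =>
        let h := pvHand prev (pvRstripDot (PySem.Chars.strip s) ++ nxt)
        h.1 ++ pvGo (some h.2) rest2
      | [] =>
        let h := pvHand prev s
        h.1 ++ pvGo (some h.2) []
    else
      let h := pvHand prev s
      h.1 ++ pvGo (some h.2) rest
termination_by l => l.length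

def merge_orphaned_quotes_py_alt (sentences : List String) : List String :=
  (pvGo none (sentences.map String.toList)).map String.ofList

-- ===== PRECONDITION & SPEC =====
def Spec_merge_orphaned_quotes_py (sentences : List String) (out : List String) : Prop := out = merge_orphaned_quotes_py_alt sentences
instance (sentences : List String) (out : List String) : Decidable (Spec_merge_orphaned_quotes_py sentences out) := by unfold Spec_merge_orphaned_quotes_py; infer_instance

-- ===== CLAIM (what is proved, stated in full; the proofs are below) =====
def Claim_equal_merge_orphaned_quotes_py : Prop := ∀ (sentences : List String), Dom_merge_orphaned_quotes_py sentences → Spec_merge_orphaned_quotes_py sentences (merge_orphaned_quotes_py sentences)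

-- ===== LEMMAS AND PROOFS =====

-- Proof-layer staged characterisation of both ports (used only below this line):
-- pass 1 of A as structural recursion
def pvB1 : List (List Char) → List (List Char)
  | [] => []
  | s :: rest =>
    if pvIsOrphan s then
      match rest with
      | nxt :: rest' => (pvRstripDot (PySem.Chars.strip s) ++ nxt) :: pvB1 rest'
      | [] => [s]
    else s :: pvB1 rest

-- pass 2 of A as a prefix-threading scan
def pvB2 (pfx : List Char) : List (List Char) → List (List Char)
  | [] => []
  | s :: rest =>
    let cur := pfx ++ s
    if pvTrail cur then
      let t := (PySem.List.pyGet? cur (-1)).getD ' '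
      let cur' := PySem.List.slice cur none (some (-2))
      let pfx' := match rest with
        | nxt :: _ => if !pvStartsQ nxt then [t] else []
        | [] => []
      cur' :: pvB2 pfx' rest
    else cur :: pvB2 [] rest

-- B's flushing recursion, driven by an already-merged stream
def pvFin : Option (List Char) → List (List Char) → List (List Char)
  | none, [] => []
  | some p, [] => if pvTrail p then [PySem.List.slice p none (some (-2))] else [p]
  | prev, m :: ms =>
    let h := pvHand prev m
    h.1 ++ pvFin (some h.2) ms

theorem pv_getD_mid {α : Type} (pre : List α) (y : α) (rest : List α) (d : α) :
    (pre ++ y :: rest).getD pre.length d = y := by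
  simp [List.getD_eq_getElem?_getD]

theorem pv_getD_mid1 {α : Type} (pre : List α) (y z : α) (rest : List α) (d : α) :
    (pre ++ y :: z :: rest).getD (pre.length + 1) d = z := by
  simpa using pv_getD_mid (pre ++ [y]) z rest d

theorem pv_set_mid1 {α : Type} (pre : List α) (y z : α) (rest : List α) (v : α) :
    (pre ++ y :: z :: rest).set (pre.length + 1) v = pre ++ y :: v :: rest := by
  have h : (pre ++ [y] ++ z :: rest).set (pre ++ [y]).length v = pre ++ [y] ++ v :: rest := by
    induction (pre ++ [y]) with
    | nil => simp
    | cons a l ih => simp [ih]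
  simpa using h

theorem pv_drop_cons {α : Type} (xs : List α) (i : Nat) (h : i < xs.length) (d : α) :
    xs.drop i = xs.getD i d :: xs.drop (i + 1) := by
  rw [List.getD_eq_getElem?_getD, List.getElem?_eq_getElem h]
  exact List.drop_eq_getElem_cons h

theorem pvA1_eq_B1 (xs : List (List Char)) (i : Nat) (acc : List (List Char)) :
    pvA1 xs i acc = acc ++ pvB1 (xs.drop i) := by
  induction i, acc using pvA1.induct xs with
  | case1 i acc h sent ho h2 ih =>
    rw [pvA1, dif_pos h, if_pos ho, if_pos h2, ih,
        pv_drop_cons xs i h [], pv_drop_cons xs (i+1) h2 []]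
    have ho' : pvIsOrphan (xs[i]?.getD []) = true := by
      rw [← List.getD_eq_getElem?_getD]; exact ho
    simp [pvB1, ho', List.getD_eq_getElem?_getD]
    rfl
  | case2 i acc h sent ho h2 ih =>
    rw [pvA1, dif_pos h, if_pos ho, if_neg h2, ih, pv_drop_cons xs i h []]
    have : xs.drop (i+1) = [] := List.drop_eq_nil_of_le (by omega)
    have ho' : pvIsOrphan (xs[i]?.getD []) = true := by
      rw [← List.getD_eq_getElem?_getD]; exact ho
    simp [pvB1, ho', this, List.getD_eq_getElem?_getD]
    rfl
  | case3 i acc h sent ho ih =>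
    rw [pvA1, dif_pos h, if_neg ho, ih, pv_drop_cons xs i h []]
    have ho2 : ¬ pvIsOrphan (xs[i]?.getD []) = true := ho
    conv_rhs => rw [pvB1.eq_def]
    simp [ho2]
    rfl
  | case4 i acc h =>
    rw [pvA1, dif_neg h]
    have : xs.drop i = [] := List.drop_eq_nil_of_le (by omega)
    simp [pvB1, this]

theorem pvA2_eq_B2 (rest : List (List Char)) :
    ∀ (pre : List (List Char)) (pfx x : List Char) (fixed : List (List Char)),
    pvA2 (pre ++ (pfx ++ x) :: rest) pre.length fixed = fixed ++ pvB2 pfx (x :: rest) := by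
  induction rest with
  | nil =>
    intro pre pfx x fixed
    rw [pvA2]
    have h1 : pre.length < (pre ++ [pfx ++ x]).length := by simp
    rw [dif_pos h1]
    simp only [pv_getD_mid]
    by_cases hT : pvTrail (pfx ++ x)
    · rw [if_pos hT]
      have hc : ¬ (pre.length + 1 < (pre ++ [pfx ++ x]).length) := by simp
      simp only [hc, decide_false, Bool.false_and, if_neg (by simp : ¬ (false = true))]
      rw [pvA2]
      rw [dif_neg (by simp)]
      simp [pvB2, hT]
    · rw [if_neg hT, pvA2, dif_neg (by simp)]
      simp [pvB2, hT]
  | cons nxt rest' ih =>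
    intro pre pfx x fixed
    rw [pvA2]
    have h1 : pre.length < (pre ++ (pfx ++ x) :: nxt :: rest').length := by simp
    rw [dif_pos h1]
    simp only [pv_getD_mid, pv_getD_mid1]
    have h2 : pre.length + 1 < (pre ++ (pfx ++ x) :: nxt :: rest').length := by
      simp
    by_cases hT : pvTrail (pfx ++ x)
    · rw [if_pos hT]
      by_cases hQ : pvStartsQ nxt
      · simp only [hQ, Bool.not_true, Bool.and_false, if_neg (by simp : ¬ (false = true))]
        have e : pre ++ (pfx ++ x) :: nxt :: rest'
            = (pre ++ [pfx ++ x]) ++ (([] : List Char) ++ nxt) :: rest' := by simp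
        have el : pre.length + 1 = (pre ++ [pfx ++ x]).length := by simp
        rw [e, el, ih]
        simp [pvB2, hT, hQ]
      · simp only [h2, decide_true, Bool.true_and, hQ, Bool.not_false]
        rw [pv_set_mid1, if_pos trivial]
        have e : pre ++ (pfx ++ x) :: ([(PySem.List.pyGet? (pfx ++ x) (-1)).getD ' '] ++ nxt) :: rest'
            = (pre ++ [pfx ++ x]) ++ ([(PySem.List.pyGet? (pfx ++ x) (-1)).getD ' '] ++ nxt) :: rest' := by simp
        have el : pre.length + 1 = (pre ++ [pfx ++ x]).length := by simp
        rw [e, el, ih]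
        simp [pvB2, hT, hQ]
    · rw [if_neg hT]
      have e : pre ++ (pfx ++ x) :: nxt :: rest'
          = (pre ++ [pfx ++ x]) ++ (([] : List Char) ++ nxt) :: rest' := by simp
      have el : pre.length + 1 = (pre ++ [pfx ++ x]).length := by simp
      rw [e, el, ih]
      simp [pvB2, hT]

-- B's fused pass equals pass-1 followed by the flushing recursion
theorem pvGo_eq_fin (prev : Option (List Char)) (xs : List (List Char)) :
    pvGo prev xs = pvFin prev (pvB1 xs) := by
  induction prev, xs using pvGo.induct with
  | case1 => simp [pvGo.eq_def, pvB1, pvFin]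
  | case2 p hT => simp [pvGo.eq_def, pvB1, pvFin, hT]
  | case3 p hT => simp [pvGo.eq_def, pvB1, pvFin, hT]
  | case4 prev s ho nxt rest2 hh ih =>
    rw [pvGo.eq_def]
    simp only [ho, if_true]
    rw [ih]
    try simp [pvB1, ho, pvFin]
    try rfl
  | case5 prev s ho hh ih =>
    rw [pvGo.eq_def]
    simp only [ho, if_true]
    rw [ih]
    try simp [pvB1, ho, pvFin]
    try rfl
  | case6 prev s rest ho hh ih =>
    rw [pvGo.eq_def]
    simp only [ho, Bool.false_eq_true, if_false]
    rw [ih]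
    conv_rhs => rw [pvB1.eq_def]
    simp only [ho, Bool.false_eq_true, if_false]
    conv_rhs => rw [pvFin]

-- the flushing recursion equals A's pass-2 scan
theorem pvFin_eq_B2 (ms : List (List Char)) :
    ∀ (pfx x : List Char), pvFin (some (pfx ++ x)) ms = pvB2 pfx (x :: ms) := by
  induction ms with
  | nil =>
    intro pfx x
    simp [pvFin, pvB2]
  | cons m ms' ih =>
    intro pfx x
    have hstep : pvFin (some (pfx ++ x)) (m :: ms')
        = (pvHand (some (pfx ++ x)) m).1 ++ pvFin (some (pvHand (some (pfx ++ x)) m).2) ms' := by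
      rw [pvFin]
    rw [hstep]
    by_cases hT : pvTrail (pfx ++ x)
    · by_cases hQ : pvStartsQ m
      · have h1 := ih [] m
        simp only [List.nil_append] at h1
        simp [pvHand, hT, hQ, pvB2, h1]
      · have h1 := ih [(PySem.List.pyGet? (pfx ++ x) (-1)).getD ' '] m
        simp only [List.singleton_append] at h1
        simp [pvHand, hT, hQ, pvB2, h1]
    · have h1 := ih [] m
      simp only [List.nil_append] at h1
      simp [pvHand, hT, pvB2, h1]

-- ===== VERDICT (by name: the statement is the Claim_ definition above) =====
theorem merge_orphaned_quotes_py_spec : Claim_equal_merge_orphaned_quotes_py := by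
  intro sentences _
  unfold Spec_merge_orphaned_quotes_py merge_orphaned_quotes_py merge_orphaned_quotes_py_alt
  by_cases hs : sentences = []
  · simp [hs, pvGo.eq_def]
  · rw [if_neg hs, pvA1_eq_B1, List.drop_zero, List.nil_append, pvGo_eq_fin]
    cases hm : pvB1 (sentences.map String.toList) with
    | nil => simp [pvA2, pvFin]
    | cons y m' =>
      have h2 := pvA2_eq_B2 m' [] [] y []
      have h3 := pvFin_eq_B2 m' [] y
      simp only [List.nil_append, List.length_nil] at h2 h3
      rw [h2]
      simp [pvFin, pvHand, h3]
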